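-- pv_equiv track=rewrite | github.com/AbrarZaved/Codeforces | 1999B_Card Game.py | count_suneet_wins
-- ===== SOURCE A (Python) =====
-- def count_suneet_wins(a1, a2, b1, b2):
--     suneet_cards = [a1, a2]
--     slavic_cards = [b1, b2]
--
--     wins = 0
--
--     # Possible orderings for Suneet: [(a1, a2), (a2, a1)]
--     suneet_orderings = [(a1, a2), (a2, a1)]
--     # Possible orderings for Slavic: [(b1, b2), (b2, b1)]
--     slavic_orderings = [(b1, b2), (b2, b1)]
--
--     for s_order in suneet_orderings:
--         for v_order in slavic_orderings:
--             suneet_rounds_won = 0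
--             if s_order[0] > v_order[0]:
--                 suneet_rounds_won += 1
--             if s_order[1] > v_order[1]:
--                 suneet_rounds_won += 1
--             if (
--                 suneet_rounds_won > 1
--             ):  # Suneet needs to win more than 1 round to win the game
--                 wins += 1
--
--     return wins
-- ===== SOURCE B (Python) =====
-- def count_suneet_wins(a1, a2, b1, b2):
--     # Closed form: orderings pair up symmetrically, each win condition occurs twice.
--     return 2 * ((a1 > b1 and a2 > b2) + (a1 > b2 and a2 > b1))
-- ===== Notes on version B (the rewrite author's own statement) =====
-- stated objective: simpler
-- what changed: Replaced the 2x2 nested loop over orderings with a closed-form arithmetic expression 2*((a1>b1 and a2>b2)+(a1>b2 and a2>b1)), using the symmetry that opposite ordering pairs impose the same win condition.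
import Mathlib
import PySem

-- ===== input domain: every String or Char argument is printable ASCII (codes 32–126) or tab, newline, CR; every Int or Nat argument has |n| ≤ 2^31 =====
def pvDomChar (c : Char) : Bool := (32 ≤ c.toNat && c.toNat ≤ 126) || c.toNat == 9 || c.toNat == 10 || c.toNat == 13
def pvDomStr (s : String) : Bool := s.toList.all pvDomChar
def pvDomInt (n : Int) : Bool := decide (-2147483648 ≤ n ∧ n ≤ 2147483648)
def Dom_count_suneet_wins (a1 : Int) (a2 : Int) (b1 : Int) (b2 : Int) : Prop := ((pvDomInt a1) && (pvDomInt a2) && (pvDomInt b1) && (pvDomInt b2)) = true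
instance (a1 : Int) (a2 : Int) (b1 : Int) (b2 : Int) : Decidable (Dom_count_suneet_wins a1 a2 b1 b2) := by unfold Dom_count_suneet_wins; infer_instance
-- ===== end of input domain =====

-- ===== PORT A =====
-- literal transliteration of A: nested loops over the two orderings lists
def count_suneet_wins (a1 : Int) (a2 : Int) (b1 : Int) (b2 : Int) : Int :=
  let _suneet_cards : List Int := [a1, a2]
  let _slavic_cards : List Int := [b1, b2]
  let wins : Int := 0
  let suneet_orderings : List (Int × Int) := [(a1, a2), (a2, a1)]
  let slavic_orderings : List (Int × Int) := [(b1, b2), (b2, b1)]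
  suneet_orderings.foldl (fun wins s_order =>
    slavic_orderings.foldl (fun wins v_order =>
      let suneet_rounds_won : Int := 0
      let suneet_rounds_won := if s_order.1 > v_order.1 then suneet_rounds_won + 1 else suneet_rounds_won
      let suneet_rounds_won := if s_order.2 > v_order.2 then suneet_rounds_won + 1 else suneet_rounds_won
      if suneet_rounds_won > 1 then wins + 1 else wins) wins) wins

-- ===== PORT B =====
-- transliteration of B: closed-form count
def count_suneet_wins_alt (a1 : Int) (a2 : Int) (b1 : Int) (b2 : Int) : Int :=
  2 * ((if a1 > b1 ∧ a2 > b2 then (1 : Int) else 0) + (if a1 > b2 ∧ a2 > b1 then (1 : Int) else 0))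

-- ===== PRECONDITION & SPEC =====
def Spec_count_suneet_wins (a1 : Int) (a2 : Int) (b1 : Int) (b2 : Int) (out : Int) : Prop := out = count_suneet_wins_alt a1 a2 b1 b2
instance (a1 : Int) (a2 : Int) (b1 : Int) (b2 : Int) (out : Int) : Decidable (Spec_count_suneet_wins a1 a2 b1 b2 out) := by unfold Spec_count_suneet_wins; infer_instance

-- ===== CLAIM (what is proved, stated in full; the proofs are below) =====
def Claim_equal_count_suneet_wins : Prop := ∀ (a1 : Int) (a2 : Int) (b1 : Int) (b2 : Int), Dom_count_suneet_wins a1 a2 b1 b2 → Spec_count_suneet_wins a1 a2 b1 b2 (count_suneet_wins a1 a2 b1 b2)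

-- ===== LEMMAS AND PROOFS =====

-- ===== VERDICT (by name: the statement is the Claim_ definition above) =====
theorem count_suneet_wins_spec : Claim_equal_count_suneet_wins := by
  intro a1 a2 b1 b2 _
  unfold Spec_count_suneet_wins count_suneet_wins count_suneet_wins_alt
  simp only [List.foldl]
  split_ifs <;> omega
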